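-- pv_equiv track=rewrite | github.com/txnguyen292/agentic_job_scraping_public | src/job_scraper/registry.py | _reference_summary
-- ===== SOURCE A (Python) =====
-- def _reference_summary(content: str) -> str:
--     for raw_line in content.splitlines():
--         line = raw_line.strip()
--         if line.startswith("#"):
--             return _compact_summary(line.lstrip("#").strip())
--     for raw_line in content.splitlines():
--         line = raw_line.strip()
--         if line:
--             return _compact_summary(line)
--     return "Reference resource."
--
-- def _compact_summary(text: str, max_chars: int = 180) -> str:
--     summary = " ".join(str(text).split())
--     if len(summary) <= max_chars:
--         return summary
--     return f"{summary[: max_chars - 15]}...[truncated]"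
-- ===== SOURCE B (Python) =====
-- def _reference_summary(content: str) -> str:
--     first_nonempty = None
--     for raw_line in content.splitlines():
--         line = raw_line.strip()
--         if line.startswith("#"):
--             return _compact_summary(line.lstrip("#").strip())
--         if first_nonempty is None and line:
--             first_nonempty = line
--     if first_nonempty is not None:
--         return _compact_summary(first_nonempty)
--     return "Reference resource."
--
-- def _compact_summary(text: str, max_chars: int = 180) -> str:
--     summary = " ".join(str(text).split())
--     if len(summary) <= max_chars:
--         return summary
--     return f"{summary[: max_chars - 15]}...[truncated]"
-- ===== Notes on version B (the rewrite author's own statement) =====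
-- stated objective: alternative
-- what changed: Replaces A's two sequential scans of splitlines() (one for a heading, one for the first non-empty line) by a single pass that returns on the first heading and carries the first non-empty line in an accumulator.
import Mathlib
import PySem

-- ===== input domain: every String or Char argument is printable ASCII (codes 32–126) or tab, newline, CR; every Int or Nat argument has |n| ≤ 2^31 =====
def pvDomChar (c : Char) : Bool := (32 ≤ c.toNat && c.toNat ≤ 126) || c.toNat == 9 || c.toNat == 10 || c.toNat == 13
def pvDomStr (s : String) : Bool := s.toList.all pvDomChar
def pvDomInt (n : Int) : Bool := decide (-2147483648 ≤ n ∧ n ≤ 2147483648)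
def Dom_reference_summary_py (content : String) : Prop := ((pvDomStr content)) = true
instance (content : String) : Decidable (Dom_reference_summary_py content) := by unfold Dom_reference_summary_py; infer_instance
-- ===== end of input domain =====

-- B merges A's two scans of content.splitlines() into one pass with a first-non-empty accumulator; same return value everywhere.

-- ===== PORT A =====
-- _compact_summary(text, max_chars=180); line-by-line port, over List Char
def pvCompact (text : List Char) (maxChars : Int) : List Char :=
  let summary := PySem.Chars.join [' '] (PySem.Chars.split₀ text)
  if (summary.length : Int) ≤ maxChars then summary
  else PySem.List.slice summary none (some (maxChars - 15)) ++ "...[truncated]".toList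

-- first loop of A: scan for a '#'-heading line
def pvALoop1 : List (List Char) → Option (List Char)
  | [] => none
  | l :: ls =>
    let line := PySem.Chars.strip l
    if PySem.Chars.startswith line ['#'] then
      -- line.lstrip("#") hand-ported as dropWhile (= '#'): exact for a single-char strip set
      some (pvCompact (PySem.Chars.strip (line.dropWhile (· == '#'))) 180)
    else pvALoop1 ls

-- second loop of A: first non-empty stripped line
def pvALoop2 : List (List Char) → Option (List Char)
  | [] => none
  | l :: ls =>
    let line := PySem.Chars.strip l
    if line ≠ [] then some (pvCompact line 180) else pvALoop2 ls

def reference_summary_py (content : String) : String :=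
  let lines := PySem.Chars.splitlines content.toList
  match pvALoop1 lines with
  | some r => String.ofList r
  | none =>
    match pvALoop2 lines with
    | some r => String.ofList r
    | none => "Reference resource."

-- ===== PORT B =====
-- single pass; fn carries the first non-empty stripped line seen so far
def pvBLoop : List (List Char) → Option (List Char) → String
  | [], none => "Reference resource."
  | [], some fn => String.ofList (pvCompact fn 180)
  | l :: ls, fn =>
    let line := PySem.Chars.strip l
    if PySem.Chars.startswith line ['#'] then
      String.ofList (pvCompact (PySem.Chars.strip (line.dropWhile (· == '#'))) 180)
    else pvBLoop ls (if fn.isNone && line ≠ [] then some line else fn)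

def reference_summary_py_alt (content : String) : String :=
  pvBLoop (PySem.Chars.splitlines content.toList) none

-- ===== PRECONDITION & SPEC =====
def Spec_reference_summary_py (content : String) (out : String) : Prop := out = reference_summary_py_alt content
instance (content : String) (out : String) : Decidable (Spec_reference_summary_py content out) := by unfold Spec_reference_summary_py; infer_instance

-- ===== CLAIM (what is proved, stated in full; the proofs are below) =====
def Claim_equal_reference_summary_py : Prop := ∀ (content : String), Dom_reference_summary_py content → Spec_reference_summary_py content (reference_summary_py content)

-- ===== LEMMAS AND PROOFS =====
lemma pvBLoop_eq (lines : List (List Char)) :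
    ∀ fn : Option (List Char), pvBLoop lines fn =
      match pvALoop1 lines with
      | some r => (String.ofList r : String)
      | none =>
        match fn with
        | some f => (String.ofList (pvCompact f 180) : String)
        | none =>
          match pvALoop2 lines with
          | some r => (String.ofList r : String)
          | none => "Reference resource." := by
  induction lines with
  | nil => intro fn; cases fn <;> rfl
  | cons l ls ih =>
    intro fn
    simp only [pvBLoop, pvALoop1, pvALoop2]
    by_cases h : PySem.Chars.startswith (PySem.Chars.strip l) ['#'] = true
    · simp [h]
    · simp only [Bool.not_eq_true] at h
      simp only [h, if_false, Bool.false_eq_true]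
      rw [ih]
      cases fn with
      | some f => simp
      | none =>
        by_cases hne : PySem.Chars.strip l ≠ []
        · simp [hne]
        · simp at hne; simp [hne]

-- ===== VERDICT (by name: the statement is the Claim_ definition above) =====
theorem reference_summary_py_spec : Claim_equal_reference_summary_py := by
  intro content _
  unfold Spec_reference_summary_py reference_summary_py reference_summary_py_alt
  rw [pvBLoop_eq]
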